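-- pv_equiv track=rewrite | github.com/Yass2501/BDK_RMR_py_1.0 | src/date_time_handling.py | array_of_equivalent_days
-- ===== SOURCE A (Python) =====
-- def nearest_multiple(input_number, multiple):
--     nearest_multiple = 0
--     for i in range(0,2*multiple):
--         if((input_number+i) % multiple == 0):
--             nearest_multiple = input_number+i
--             return [nearest_multiple, i]
--         if((input_number-i) % multiple == 0):
--             nearest_multiple = input_number-i
--             return [nearest_multiple, -i]
--
-- def array_of_equivalent_days(total_of_days, multiple):
--     days_array  = [0 for i in range(multiple)]
--     nearest_mult, delta = nearest_multiple(total_of_days, multiple)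
--     for i in range(multiple):
--         if((multiple - (i+1)) < abs(delta)):
--             days_array[i] = int(nearest_mult / multiple) - int((delta)/abs(delta))
--         else:
--             days_array[i] = int (nearest_mult / multiple)
--
--     return days_array
-- ===== SOURCE B (Python) =====
-- def array_of_equivalent_days(total_of_days, multiple):
--     q, r = divmod(total_of_days, multiple)
--     if r == 0:
--         return [q] * multiple
--     if 2 * r >= multiple:
--         return [q + 1] * r + [q] * (multiple - r)
--     return [q] * (multiple - r) + [q + 1] * r
-- ===== Notes on version B (the rewrite author's own statement) =====
-- stated objective: faster
-- what changed: Replaces the linear nearest-multiple search loop and the per-element branch loop with direct divmod arithmetic and list repetition: q,r = divmod(n,m); r==0 gives [q]*m, 2r>=m gives [q+1]*r+[q]*(m-r), else [q]*(m-r)+[q+1]*r.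
import Mathlib
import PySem

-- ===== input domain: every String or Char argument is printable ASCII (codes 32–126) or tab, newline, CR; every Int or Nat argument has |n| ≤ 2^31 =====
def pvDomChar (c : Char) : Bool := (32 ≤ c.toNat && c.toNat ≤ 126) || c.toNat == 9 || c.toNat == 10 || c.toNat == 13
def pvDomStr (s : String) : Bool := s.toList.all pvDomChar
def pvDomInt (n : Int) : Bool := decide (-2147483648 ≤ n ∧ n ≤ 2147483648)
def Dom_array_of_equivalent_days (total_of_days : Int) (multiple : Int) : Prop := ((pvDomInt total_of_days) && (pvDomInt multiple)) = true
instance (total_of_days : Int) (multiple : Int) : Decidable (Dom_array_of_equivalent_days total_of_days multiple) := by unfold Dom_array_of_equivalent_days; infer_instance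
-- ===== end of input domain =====

-- B replaces A's linear nearest-multiple search loop and per-index branch loop by direct
-- divmod arithmetic and list repetition (objective: faster, constant-factor).

-- ===== PORT A =====
-- the 'for i in range(0, 2*multiple)' search loop of nearest_multiple;
-- none = the loop falls through (Python then returns None; the caller's unpacking raises TypeError)
def nearestMultipleLoop (input_number : Int) (multiple : Int) : List Int → Option (Int × Int)
  | [] => none
  | i :: rest =>
    if PySem.Int.mod (input_number + i) multiple = 0 then some (input_number + i, i)
    else if PySem.Int.mod (input_number - i) multiple = 0 then some (input_number - i, -i)
    else nearestMultipleLoop input_number multiple rest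

def nearest_multiple (input_number : Int) (multiple : Int) : Option (Int × Int) :=
  nearestMultipleLoop input_number multiple (PySem.List.pyRange 0 (2 * multiple) 1)

-- int(nearest_mult / multiple) and int(delta / abs(delta)) are float divisions in A; on every
-- input Pre_ admits they are exact (numerator a multiple of the denominator, |values| < 2^53),
-- so the truncated float quotient equals the floor quotient and is ported as PySem.Int.floordiv.
def array_of_equivalent_days (total_of_days : Int) (multiple : Int) : List Int :=
  let days_array := (PySem.List.pyRange 0 multiple 1).map (fun _ => (0 : Int))
  match nearest_multiple total_of_days multiple with
  | none => []  -- Python raises TypeError here (multiple ≤ 0); excluded by Pre_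
  | some (nearest_mult, delta) =>
    (PySem.List.pyRange 0 multiple 1).foldl
      (fun arr i =>
        PySem.List.pySetD arr i
          (if multiple - (i + 1) < |delta| then
            PySem.Int.floordiv nearest_mult multiple - PySem.Int.floordiv delta |delta|
          else
            PySem.Int.floordiv nearest_mult multiple))
      days_array

-- ===== PORT B =====
def array_of_equivalent_days_alt (total_of_days : Int) (multiple : Int) : List Int :=
  match PySem.Int.divmod? total_of_days multiple with
  | none => []  -- multiple = 0: Python raises ZeroDivisionError; excluded by Pre_
  | some (q, r) =>
    if r = 0 then List.replicate multiple.toNat q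
    else if 2 * r ≥ multiple then
      List.replicate r.toNat (q + 1) ++ List.replicate (multiple - r).toNat q
    else
      List.replicate (multiple - r).toNat q ++ List.replicate r.toNat (q + 1)

-- ===== PRECONDITION & SPEC =====
-- A raises TypeError for every multiple ≤ 0 (nearest_multiple's loop never hits — range(0,2*multiple)
-- is empty — so it returns None, which the caller unpacks); Pre_ excludes exactly those inputs.
def Pre_array_of_equivalent_days (total_of_days : Int) (multiple : Int) : Prop := 1 ≤ multiple
instance (total_of_days : Int) (multiple : Int) : Decidable (Pre_array_of_equivalent_days total_of_days multiple) := by unfold Pre_array_of_equivalent_days; infer_instance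
def pvWitness_array_of_equivalent_days : Int × Int := (7, 3)
def Spec_array_of_equivalent_days (total_of_days : Int) (multiple : Int) (out : List Int) : Prop := out = array_of_equivalent_days_alt total_of_days multiple
instance (total_of_days : Int) (multiple : Int) (out : List Int) : Decidable (Spec_array_of_equivalent_days total_of_days multiple out) := by unfold Spec_array_of_equivalent_days; infer_instance

-- ===== CLAIM (what is proved, stated in full; the proofs are below) =====
def Claim_equal_array_of_equivalent_days : Prop := ∀ (total_of_days : Int) (multiple : Int), Dom_array_of_equivalent_days total_of_days multiple → Pre_array_of_equivalent_days total_of_days multiple → Spec_array_of_equivalent_days total_of_days multiple (array_of_equivalent_days total_of_days multiple)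

-- ===== LEMMAS AND PROOFS =====

theorem not_dvd_of_bounds {m x : Int} (h1 : 0 < x) (h2 : x < m) : ¬ m ∣ x :=
  fun h => absurd (Int.le_of_dvd h1 h) (by omega)

theorem nmLoop_append (n m : Int) (xs ys : List Int)
    (h : ∀ i ∈ xs, PySem.Int.mod (n + i) m ≠ 0 ∧ PySem.Int.mod (n - i) m ≠ 0) :
    nearestMultipleLoop n m (xs ++ ys) = nearestMultipleLoop n m ys := by
  induction xs with
  | nil => rfl
  | cons x xs ih =>
    obtain ⟨h1, h2⟩ := h x (by simp)
    simp only [List.cons_append, nearestMultipleLoop, if_neg h1, if_neg h2]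
    exact ih (fun i hi => h i (by simp [hi]))

-- closed form of A's search loop: for 0 < m it returns the nearest multiple of m
-- (ties towards +) together with the signed offset
theorem nearest_multiple_eq (n m : Int) (hm : 0 < m) :
    nearest_multiple n m =
      (if n % m = 0 then some (n, 0)
       else if m - n % m ≤ n % m then some (n + (m - n % m), m - n % m)
       else some (n - n % m, -(n % m))) := by
  have hn : m * (n / m) + n % m = n := Int.mul_ediv_add_emod n m
  have hr0 : 0 ≤ n % m := Int.emod_nonneg n (by omega)
  have hrm : n % m < m := Int.emod_lt_of_pos n hm
  have hdvd : ∀ x y : Int, x = m * y → PySem.Int.mod x m = 0 := by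
    intro x y hxy
    rw [PySem.Int.mod_eq_zero_iff_dvd]
    exact ⟨y, hxy⟩
  have hndvd : ∀ x : Int, 0 < x - m * (n / m) → x - m * (n / m) < m → PySem.Int.mod x m ≠ 0 := by
    intro x hx1 hx2 hc
    rw [PySem.Int.mod_eq_zero_iff_dvd] at hc
    obtain ⟨y, hy⟩ := hc
    exact not_dvd_of_bounds hx1 hx2 ⟨y - n / m, by rw [Int.mul_sub]; omega⟩
  by_cases hr : n % m = 0
  · rw [if_pos hr]
    rw [nearest_multiple, PySem.List.pyRange_one_cons (by omega)]
    simp only [nearestMultipleLoop, add_zero]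
    rw [if_pos (hdvd n (n / m) (by omega))]
  · rw [if_neg hr]
    by_cases hle : m - n % m ≤ n % m
    · rw [if_pos hle]
      rw [nearest_multiple,
        PySem.List.pyRange_one_append 0 (m - n % m) (2 * m) (by omega) (by omega),
        nmLoop_append n m _ _ (by
          intro i hi
          rw [PySem.List.mem_pyRange_one] at hi
          exact ⟨hndvd _ (by omega) (by omega), hndvd _ (by omega) (by omega)⟩),
        PySem.List.pyRange_one_cons (by omega)]
      simp only [nearestMultipleLoop,
        if_pos (hdvd (n + (m - n % m)) (n / m + 1) (by rw [Int.mul_add]; omega))]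
    · rw [if_neg hle]
      rw [nearest_multiple,
        PySem.List.pyRange_one_append 0 (n % m) (2 * m) (by omega) (by omega),
        nmLoop_append n m _ _ (by
          intro i hi
          rw [PySem.List.mem_pyRange_one] at hi
          exact ⟨hndvd _ (by omega) (by omega), hndvd _ (by omega) (by omega)⟩),
        PySem.List.pyRange_one_cons (by omega)]
      simp only [nearestMultipleLoop,
        if_neg (hndvd (n + n % m) (by omega) (by omega)),
        if_pos (hdvd (n - n % m) (n / m) (by omega))]

-- A's index-assignment loop over a full range rewrites every slot: it is the map of the
-- assigned value over the same range
theorem foldl_set_range (v : Int → Int) :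
    ∀ (suf pre : List Int),
      (PySem.List.pyRange (pre.length : Int) ((pre.length : Int) + (suf.length : Int)) 1).foldl
        (fun arr i => PySem.List.pySetD arr i (v i)) (pre ++ suf)
      = pre ++ (PySem.List.pyRange (pre.length : Int) ((pre.length : Int) + (suf.length : Int)) 1).map v := by
  intro suf
  induction suf with
  | nil =>
    intro pre
    rw [PySem.List.pyRange_one_eq_nil (by simp)]
    simp
  | cons s suf ih =>
    intro pre
    have hcons : PySem.List.pyRange (pre.length : Int) ((pre.length : Int) + ((s :: suf).length : Int)) 1
        = (pre.length : Int) :: PySem.List.pyRange ((pre.length : Int) + 1) ((pre.length : Int) + ((s :: suf).length : Int)) 1 := by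
      apply PySem.List.pyRange_one_cons
      simp only [List.length_cons]
      push_cast
      omega
    rw [hcons]
    simp only [List.foldl_cons, List.map_cons]
    have hset : PySem.List.pySetD (pre ++ s :: suf) (pre.length : Int) (v pre.length)
        = (pre ++ [v pre.length]) ++ suf := by
      rw [PySem.List.pySetD_natCast, List.set_append]
      simp
    rw [hset]
    have h2 := ih (pre ++ [v pre.length])
    simp only [List.length_append, List.length_cons, List.length_nil] at h2
    simp only [List.length_cons] at *
    push_cast at h2 ⊢
    rw [show (pre.length : Int) + 1 + (suf.length : Int) = (pre.length : Int) + ((suf.length : Int) + 1) by ring] at h2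
    rw [h2]
    simp

-- mapping a front/back threshold branch over range(m) is two replicate blocks
theorem map_threshold (m t a b : Int) (h0 : 0 ≤ t) (h1 : t ≤ m) :
    (PySem.List.pyRange 0 m 1).map (fun i => if m - (i + 1) < t then a else b)
    = List.replicate (m - t).toNat b ++ List.replicate t.toNat a := by
  rw [PySem.List.pyRange_one_append 0 (m - t) m (by omega) (by omega), List.map_append]
  have hb : (PySem.List.pyRange 0 (m - t) 1).map (fun i => if m - (i + 1) < t then a else b)
      = List.replicate (m - t).toNat b := by
    rw [List.map_congr_left (g := fun _ => b)
      (fun i hi => by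
        rw [PySem.List.mem_pyRange_one] at hi
        simp only [if_neg (by omega : ¬ m - (i + 1) < t)])]
    rw [List.map_const', PySem.List.length_pyRange_one]
    norm_num
  have ha : (PySem.List.pyRange (m - t) m 1).map (fun i => if m - (i + 1) < t then a else b)
      = List.replicate t.toNat a := by
    rw [List.map_congr_left (g := fun _ => a)
      (fun i hi => by
        rw [PySem.List.mem_pyRange_one] at hi
        simp only [if_pos (by omega : m - (i + 1) < t)])]
    rw [List.map_const', PySem.List.length_pyRange_one]
    congr 1
    omega
  rw [hb, ha]

-- ===== VERDICT (by name: the statement is the Claim_ definition above) =====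
theorem array_of_equivalent_days_spec : Claim_equal_array_of_equivalent_days := by
  intro n m hdom hpre
  have hm : 0 < m := hpre
  have hn : m * (n / m) + n % m = n := Int.mul_ediv_add_emod n m
  have hr0 : 0 ≤ n % m := Int.emod_nonneg n (by omega)
  have hrm : n % m < m := Int.emod_lt_of_pos n hm
  -- the index-assignment loop of A, as a map over the range
  have hfold : ∀ v : Int → Int,
      (PySem.List.pyRange 0 m 1).foldl
        (fun arr i => PySem.List.pySetD arr i (v i))
        ((PySem.List.pyRange 0 m 1).map (fun _ => (0 : Int)))
      = (PySem.List.pyRange 0 m 1).map v := by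
    intro v
    have h := foldl_set_range v ((PySem.List.pyRange 0 m 1).map (fun _ => (0 : Int))) []
    simp only [List.length_nil, List.nil_append, List.length_map,
      PySem.List.length_pyRange_one, Nat.cast_zero, zero_add] at h
    rw [show (((m - 0).toNat : Int)) = m by omega] at h
    exact h
  -- B's divmod
  have hB : array_of_equivalent_days_alt n m =
      (if n % m = 0 then List.replicate m.toNat (n / m)
       else if 2 * (n % m) ≥ m then
         List.replicate (n % m).toNat (n / m + 1) ++ List.replicate (m - n % m).toNat (n / m)
       else
         List.replicate (m - n % m).toNat (n / m) ++ List.replicate (n % m).toNat (n / m + 1)) := by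
    rw [array_of_equivalent_days_alt, PySem.Int.divmod?, if_neg (by omega : ¬ m = 0)]
    rw [show n.fdiv m = n / m from PySem.Int.floordiv_eq_ediv_of_pos hm,
        show n.fmod m = n % m from PySem.Int.mod_eq_emod_of_pos hm]
  rw [Spec_array_of_equivalent_days, hB]
  simp only [array_of_equivalent_days]
  rw [nearest_multiple_eq n m hm]
  by_cases hr : n % m = 0
  · rw [if_pos hr, if_pos hr]
    simp only [abs_zero]
    rw [hfold, map_threshold m 0 _ _ (le_refl 0) (by omega)]
    rw [show PySem.Int.floordiv n m = n / m from PySem.Int.floordiv_eq_ediv_of_pos hm]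
    simp
  · rw [if_neg hr, if_neg hr]
    by_cases hle : m - n % m ≤ n % m
    · rw [if_pos hle, if_pos (by omega : 2 * (n % m) ≥ m)]
      have habs : |m - n % m| = m - n % m := abs_of_pos (by omega)
      have hq1 : PySem.Int.floordiv (n + (m - n % m)) m = n / m + 1 := by
        rw [show PySem.Int.floordiv (n + (m - n % m)) m = (n + (m - n % m)) / m from
              PySem.Int.floordiv_eq_ediv_of_pos hm,
            show n + (m - n % m) = m * (n / m + 1) by rw [Int.mul_add]; omega,
            Int.mul_ediv_cancel_left _ (by omega : m ≠ 0)]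
      have hq2 : PySem.Int.floordiv (m - n % m) (m - n % m) = 1 := by
        rw [show PySem.Int.floordiv (m - n % m) (m - n % m) = (m - n % m) / (m - n % m) from
              PySem.Int.floordiv_eq_ediv_of_pos (by omega),
            Int.ediv_self (by omega)]
      simp only [habs, hq1, hq2]
      rw [hfold, map_threshold m (m - n % m) _ _ (by omega) (by omega)]
      rw [show m - (m - n % m) = n % m by omega]
      norm_num
    · rw [if_neg hle, if_neg (by omega : ¬ 2 * (n % m) ≥ m)]
      have habs : |-(n % m)| = n % m := by rw [abs_neg, abs_of_pos (by omega)]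
      have hq1 : PySem.Int.floordiv (n - n % m) m = n / m := by
        rw [show PySem.Int.floordiv (n - n % m) m = (n - n % m) / m from
              PySem.Int.floordiv_eq_ediv_of_pos hm,
            show n - n % m = m * (n / m) by omega,
            Int.mul_ediv_cancel_left _ (by omega : m ≠ 0)]
      have hq2 : PySem.Int.floordiv (-(n % m)) (n % m) = -1 := by
        rw [show PySem.Int.floordiv (-(n % m)) (n % m) = -(n % m) / (n % m) from
              PySem.Int.floordiv_eq_ediv_of_pos (by omega),
            show -(n % m) = (n % m) * (-1) by ring,
            Int.mul_ediv_cancel_left _ (by omega : n % m ≠ 0)]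
      simp only [habs, hq1, hq2]
      rw [hfold, map_threshold m (n % m) _ _ (by omega) (by omega)]
      norm_num
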